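-- pv_equiv track=rewrite | github.com/rtlnl/ictwithindustry2019 | Translation/combine_translations_1k.py | combine_google_items
-- ===== SOURCE A (Python) =====
-- from collections import defaultdict
--
-- def combine_google_items(entries):
--     "Combine entries from different rows."
--     index = defaultdict(list)
--     for entry in entries:
--         key = entry['key']
--         translation = entry['translation']
--         index[key].append(translation)
--     results = dict()
--     for key, translations in index.items():
--         results[key] = ', '.join(translations)
--     return results
-- ===== SOURCE B (Python) =====
-- def combine_google_items(entries):
--     "Combine entries from different rows."
--     keys = []
--     for entry in entries:
--         if entry['key'] not in keys:
--             keys.append(entry['key'])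
--     return {k: ', '.join(e['translation'] for e in entries if e['key'] == k)
--             for k in keys}
-- ===== Notes on version B (the rewrite author's own statement) =====
-- stated objective: alternative
-- what changed: B first collects the distinct keys in first-occurrence order, then builds the result as a dict comprehension that, per key, joins the translations of all matching entries in one filtered scan, instead of A's defaultdict-of-lists grouping followed by a join pass.
import Mathlib
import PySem

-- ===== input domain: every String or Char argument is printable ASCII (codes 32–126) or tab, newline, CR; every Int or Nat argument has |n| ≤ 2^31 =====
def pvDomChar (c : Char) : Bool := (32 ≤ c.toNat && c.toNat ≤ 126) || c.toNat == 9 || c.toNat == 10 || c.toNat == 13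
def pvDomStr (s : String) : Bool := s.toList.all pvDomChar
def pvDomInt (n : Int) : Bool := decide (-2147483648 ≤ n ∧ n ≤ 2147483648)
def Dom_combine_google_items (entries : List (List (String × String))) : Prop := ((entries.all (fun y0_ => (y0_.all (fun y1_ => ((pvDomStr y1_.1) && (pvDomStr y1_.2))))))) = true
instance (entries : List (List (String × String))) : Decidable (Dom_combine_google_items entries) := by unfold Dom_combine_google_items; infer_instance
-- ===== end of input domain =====

-- B collects the distinct keys in first-occurrence order and then, per key, joins the
-- translations of the matching entries in one filtered scan, instead of A's
-- defaultdict-of-lists grouping followed by a second join pass (alternative algorithm).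

-- ===== PORT A =====
def combine_google_items (entries : List (List (String × String))) : List (String × String) :=
  let index : PySem.Dict String (List String) :=
    entries.foldl (fun d entry =>
      let key := (PySem.Dict.mk entry).getD "key" ""
      let translation := (PySem.Dict.mk entry).getD "translation" ""
      d.modify key [] (fun ts => ts ++ [translation])) PySem.Dict.empty
  let results : PySem.Dict String String :=
    index.items.foldl (fun r kv => r.insert kv.1 (PySem.Str.join ", " kv.2)) PySem.Dict.empty
  results.items

-- ===== PORT B =====
def pvKeyOf (e : List (String × String)) : String := (PySem.Dict.mk e).getD "key" ""
def pvTrOf (e : List (String × String)) : String := (PySem.Dict.mk e).getD "translation" ""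

def combine_google_items_alt (entries : List (List (String × String))) : List (String × String) :=
  let keys : List String :=
    entries.foldl (fun ks e => if pvKeyOf e ∈ ks then ks else ks ++ [pvKeyOf e]) []
  keys.map (fun k =>
    (k, PySem.Str.join ", " ((entries.filter (fun e => pvKeyOf e == k)).map pvTrOf)))

-- ===== PRECONDITION & SPEC =====
-- Pre_ excludes exactly the inputs where the Python A raises KeyError: an entry missing the
-- 'key' or 'translation' field (the ports read those fields with a total getD instead).
def Pre_combine_google_items (entries : List (List (String × String))) : Prop :=
  ∀ entry ∈ entries, (PySem.Dict.mk entry).contains "key" = true ∧ (PySem.Dict.mk entry).contains "translation" = true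
instance (entries : List (List (String × String))) : Decidable (Pre_combine_google_items entries) := by unfold Pre_combine_google_items; infer_instance
def pvWitness_combine_google_items : (List (List (String × String))) :=
  [[("key", "hello"), ("translation", "hola")], [("key", "hello"), ("translation", "bonjour")]]
def Spec_combine_google_items (entries : List (List (String × String))) (out : List (String × String)) : Prop := out = combine_google_items_alt entries
instance (entries : List (List (String × String))) (out : List (String × String)) : Decidable (Spec_combine_google_items entries out) := by unfold Spec_combine_google_items; infer_instance

-- ===== CLAIM (what is proved, stated in full; the proofs are below) =====
def Claim_equal_combine_google_items : Prop := ∀ (entries : List (List (String × String))), Dom_combine_google_items entries → Pre_combine_google_items entries → Spec_combine_google_items entries (combine_google_items entries)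

-- ===== LEMMAS AND PROOFS =====
def pvJoin (kv : String × List String) : String × String := (kv.1, PySem.Str.join ", " kv.2)

-- A's grouping loop, viewed through its getD: the matching translations in order
theorem pv_getD (entries : List (List (String × String))) (k : String) :
    (entries.foldl (fun d entry =>
      let key := (PySem.Dict.mk entry).getD "key" ""
      let translation := (PySem.Dict.mk entry).getD "translation" ""
      d.modify key [] (fun ts => ts ++ [translation]))
      (PySem.Dict.empty : PySem.Dict String (List String))).getD k []
    = (entries.filter (fun e => pvKeyOf e == k)).map pvTrOf := by
  have h1 : (entries.foldl (fun d entry =>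
      let key := (PySem.Dict.mk entry).getD "key" ""
      let translation := (PySem.Dict.mk entry).getD "translation" ""
      d.modify key [] (fun ts => ts ++ [translation]))
      (PySem.Dict.empty : PySem.Dict String (List String)))
      = ((entries.map (fun e => (pvKeyOf e, pvTrOf e))).foldl
          (fun d p => d.modify p.1 [] (fun ts => ts ++ [p.2])) PySem.Dict.empty) := by
    rw [List.foldl_map]
    rfl
  rw [h1, PySem.Dict.getD_foldl_modify_append]
  simp [List.filter_map, List.map_map, Function.comp_def]

-- A's grouping loop has exactly B's first-occurrence distinct keys
theorem pv_keys (entries : List (List (String × String))) :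
    (entries.foldl (fun d entry =>
      let key := (PySem.Dict.mk entry).getD "key" ""
      let translation := (PySem.Dict.mk entry).getD "translation" ""
      d.modify key [] (fun ts => ts ++ [translation]))
      (PySem.Dict.empty : PySem.Dict String (List String))).keys
    = entries.foldl (fun ks e => if pvKeyOf e ∈ ks then ks else ks ++ [pvKeyOf e]) [] := by
  have h1 := PySem.Dict.keys_foldl_modify_key entries
    (fun e => (PySem.Dict.mk e).getD "key" "") []
    (fun _ e => fun ts => ts ++ [(PySem.Dict.mk e).getD "translation" ""])
    (PySem.Dict.empty : PySem.Dict String (List String))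
  rw [h1]
  rw [show (PySem.Dict.empty : PySem.Dict String (List String)).keys = ([] : List String) from rfl]
  rw [show entries.map (fun e => (PySem.Dict.mk e).getD "key" "") = entries.map pvKeyOf from rfl]
  rw [PySem.Set.update_map_eq_foldl_add]
  simp only [PySem.Set.add_eq_ite]

theorem pv_second_loop (d : PySem.Dict String (List String)) (hnd : d.keys.Nodup) :
    (d.items.foldl (fun r kv => r.insert kv.1 (PySem.Str.join ", " kv.2))
      (PySem.Dict.empty : PySem.Dict String String)).items = d.items.map pvJoin := by
  rw [PySem.Dict.items_foldl_insert_fresh d.items Prod.fst (fun kv => PySem.Str.join ", " kv.2)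
      PySem.Dict.empty (fun a _ => rfl) hnd]
  rfl

theorem pv_main (entries : List (List (String × String))) :
    combine_google_items entries = combine_google_items_alt entries := by
  unfold combine_google_items combine_google_items_alt
  have hnd : (entries.foldl (fun d entry =>
      let key := (PySem.Dict.mk entry).getD "key" ""
      let translation := (PySem.Dict.mk entry).getD "translation" ""
      d.modify key [] (fun ts => ts ++ [translation]))
      (PySem.Dict.empty : PySem.Dict String (List String))).keys.Nodup :=
    PySem.Dict.nodup_keys_foldl_modify_key entries
      (fun e => (PySem.Dict.mk e).getD "key" "") []
      (fun _ e => fun ts => ts ++ [(PySem.Dict.mk e).getD "translation" ""])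
      PySem.Dict.empty PySem.Dict.nodup_keys_empty
  rw [pv_second_loop _ hnd]
  rw [PySem.Dict.items_eq_map_keys _ hnd []]
  rw [pv_keys entries, List.map_map]
  apply List.map_congr_left
  intro k _
  simp only [Function.comp_apply, pvJoin, pv_getD entries k]

-- ===== VERDICT (by name: the statement is the Claim_ definition above) =====
theorem combine_google_items_spec : Claim_equal_combine_google_items := by
  intro entries _ _
  unfold Spec_combine_google_items
  exact pv_main entries
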